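-- pv_equiv track=rewrite | github.com/tut-tuuut/advent-of-code-shiny-giggle | 2021/10/code.py | find_illegal_characters
-- ===== SOURCE A (Python) =====
-- def clean_string(raw_input):
--     l = None
--     s = raw_input
--     while l != len(s):
--         l = len(s)
--         s = s.replace("()", "").replace("{}", "").replace("<>", "").replace("[]", "")
--     return s
--
-- def find_illegal_characters(raw_input):
--     cleaned_input = clean_string(raw_input)
--     illegals = "]>})"
--     scores = {
--         ")": 3,
--         "]": 57,
--         "}": 1197,
--         ">": 25137,
--     }
--     found = []
--     for row in cleaned_input.splitlines():
--         indexes = [row.find(c) for c in illegals]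
--         if max(indexes) >= 0:
--             found.append(row[min(i for i in indexes if i >= 0)])
--     return sum(scores[c] for c in found)
-- ===== SOURCE B (Python) =====
-- def find_illegal_characters(raw_input):
--     openers = {")": "(", "]": "[", "}": "{", ">": "<"}
--     scores = {")": 3, "]": 57, "}": 1197, ">": 25137}
--     total = 0
--     for line in raw_input.splitlines():
--         stack = []
--         for ch in line:
--             if ch in openers:
--                 if stack and stack[-1] == openers[ch]:
--                     stack.pop()
--                 else:
--                     total += scores[ch]
--                     break
--             else:
--                 stack.append(ch)
--     return total
-- ===== Notes on version B (the rewrite author's own statement) =====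
-- stated objective: alternative
-- what changed: Replaces the repeat-replace-until-fixpoint cleaning plus per-line four-way find/min scan with a single stack pass per line that scores the first closing bracket that does not match the top of the stack.
import Mathlib
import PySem

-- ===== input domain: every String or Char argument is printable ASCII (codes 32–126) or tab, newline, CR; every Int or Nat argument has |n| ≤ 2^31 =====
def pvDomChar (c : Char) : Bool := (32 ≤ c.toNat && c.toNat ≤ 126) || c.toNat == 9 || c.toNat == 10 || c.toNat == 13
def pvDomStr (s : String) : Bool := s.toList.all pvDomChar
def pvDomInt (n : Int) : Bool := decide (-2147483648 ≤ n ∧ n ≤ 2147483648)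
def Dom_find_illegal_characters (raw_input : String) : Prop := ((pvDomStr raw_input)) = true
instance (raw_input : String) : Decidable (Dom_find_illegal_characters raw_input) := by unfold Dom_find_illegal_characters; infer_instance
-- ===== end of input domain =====

-- B replaces A's repeated replace-until-fixpoint cleaning plus per-line four-way find/min scan
-- by a single stack pass per line that scores the first closing bracket not matching the top
-- (a different algorithm of linear shape; measured speed not compared).

-- ===== PORT A =====

-- each replace("xy","") pass never lengthens the string (needed for the while-loop's termination)
theorem pvReplaceGoLen (old : List Char) : ∀ (fuel : Nat) (l acc : List Char),
    (PySem.Chars.replace.go old [] fuel l acc).length ≤ acc.length + l.length := by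
  intro fuel
  induction fuel with
  | zero => intro l acc; simp [PySem.Chars.replace.go]
  | succ n ih =>
    intro l acc
    cases l with
    | nil => simp [PySem.Chars.replace.go]
    | cons c t =>
      show (if old.isPrefixOf (c :: t) then
              PySem.Chars.replace.go old [] n (List.drop old.length (c :: t)) (List.reverse [] ++ acc)
            else PySem.Chars.replace.go old [] n t (c :: acc)).length ≤ _
      split
      · calc (PySem.Chars.replace.go old [] n (List.drop old.length (c :: t)) (List.reverse [] ++ acc)).length
              ≤ (List.reverse [] ++ acc).length + (List.drop old.length (c :: t)).length := ih _ _
          _ ≤ acc.length + (c :: t).length := by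
              simp only [List.length_append, List.length_reverse, List.length_nil, List.length_drop, List.length_cons]
              omega
      · have := ih t (c :: acc)
        simp at this ⊢; omega

theorem pvReplaceLen (s : List Char) (o c : Char) :
    (PySem.Chars.replace s [o, c] []).length ≤ s.length := by
  have h : PySem.Chars.replace s [o, c] [] = PySem.Chars.replace.go [o, c] [] s.length s [] := by
    simp [PySem.Chars.replace]
  rw [h]
  simpa using pvReplaceGoLen [o, c] s.length s []

-- one pass of the four chained replaces (the loop body of clean_string)
def pvCleanPass (s : List Char) : List Char :=
  PySem.Chars.replace (PySem.Chars.replace (PySem.Chars.replace (PySem.Chars.replace s ['(', ')'] []) ['{', '}'] []) ['<', '>'] []) ['[', ']'] []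

theorem pvCleanPassLen (s : List Char) : (pvCleanPass s).length ≤ s.length := by
  unfold pvCleanPass
  calc (PySem.Chars.replace (PySem.Chars.replace (PySem.Chars.replace (PySem.Chars.replace s ['(', ')'] []) ['{', '}'] []) ['<', '>'] []) ['[', ']'] []).length
      ≤ (PySem.Chars.replace (PySem.Chars.replace (PySem.Chars.replace s ['(', ')'] []) ['{', '}'] []) ['<', '>'] []).length := pvReplaceLen _ _ _
    _ ≤ (PySem.Chars.replace (PySem.Chars.replace s ['(', ')'] []) ['{', '}'] []).length := pvReplaceLen _ _ _
    _ ≤ (PySem.Chars.replace s ['(', ')'] []).length := pvReplaceLen _ _ _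
    _ ≤ s.length := pvReplaceLen _ _ _

-- the 'while l != len(s)' loop of clean_string
def pvCleanGo (s : List Char) : List Char :=
  if (pvCleanPass s).length = s.length then pvCleanPass s else pvCleanGo (pvCleanPass s)
termination_by s.length
decreasing_by
  have := pvCleanPassLen s
  omega

def clean_string (raw_input : String) : String := String.ofList (pvCleanGo raw_input.toList)

-- scores dict of A (dict literal, insertion order)
def pvScores : PySem.Dict Char Int :=
  PySem.Dict.ofList [(')', 3), (']', 57), ('}', 1197), ('>', 25137)]

-- indexes = [row.find(c) for c in illegals]
def pvRowIndexes (row : List Char) : List Int :=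
  [']', '>', '}', ')'].map (fun ch => PySem.Chars.find row [ch])

-- max(indexes) >= 0
def pvRowP (row : List Char) : Bool :=
  decide (0 ≤ (PySem.List.max? (pvRowIndexes row) (fun i => i)).getD (-1))

-- row[min(i for i in indexes if i >= 0)]; the .getD defaults are unreachable, guarded by max(indexes) >= 0
def pvRowC (row : List Char) : Char :=
  (PySem.List.pyGet? row ((PySem.List.min? ((pvRowIndexes row).filter (fun i => decide (0 ≤ i))) (fun i => i)).getD 0)).getD ' '

def find_illegal_characters (raw_input : String) : Int :=
  let cleaned_input := clean_string raw_input
  let found : List Char :=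
    (PySem.Chars.splitlines cleaned_input.toList).foldl (fun found row =>
      if pvRowP row then found ++ [pvRowC row] else found) []
  found.foldl (fun acc ch => acc + (PySem.Dict.get? pvScores ch).getD 0) 0

-- ===== PORT B =====

-- Source B's 'openers' dict: openers[ch] as an Option (none = ch not in openers)
def pvOpenerOf (ch : Char) : Option Char :=
  if ch = ')' then some '(' else if ch = ']' then some '[' else
  if ch = '}' then some '{' else if ch = '>' then some '<' else none

-- Source B's 'scores' dict (only ever read at closing brackets)
def pvScoreOf (ch : Char) : Int :=
  if ch = ')' then 3 else if ch = ']' then 57 else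
  if ch = '}' then 1197 else if ch = '>' then 25137 else 0

-- the inner 'for ch in line' loop with its break
def pvScanLine : List Char → List Char → Int
  | [], _ => 0
  | ch :: rest, stack =>
    match pvOpenerOf ch with
    | some o => if stack.head? = some o then pvScanLine rest stack.tail else pvScoreOf ch
    | none => pvScanLine rest (ch :: stack)

def find_illegal_characters_alt (raw_input : String) : Int :=
  (PySem.Chars.splitlines raw_input.toList).foldl (fun total line => total + pvScanLine line []) 0

-- ===== PRECONDITION & SPEC =====
def Spec_find_illegal_characters (raw_input : String) (out : Int) : Prop := out = find_illegal_characters_alt raw_input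
instance (raw_input : String) (out : Int) : Decidable (Spec_find_illegal_characters raw_input out) := by unfold Spec_find_illegal_characters; infer_instance

-- ===== CLAIM (what is proved, stated in full; the proofs are below) =====
def Claim_equal_find_illegal_characters : Prop := ∀ (raw_input : String), Dom_find_illegal_characters raw_input → Spec_find_illegal_characters raw_input (find_illegal_characters raw_input)

-- ===== LEMMAS AND PROOFS =====

-- the one-character stack step underlying B's scan (proof device)
def pvStep (st : List Char) (c : Char) : List Char :=
  match pvOpenerOf c with
  | some o => if st.head? = some o then st.tail else c :: st
  | none => c :: st

theorem pvStep_none (a : Char) (st : List Char) (h : pvOpenerOf a = none) : pvStep st a = a :: st := by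
  unfold pvStep; rw [h]

theorem pvStep_pop (a o : Char) (st : List Char) (h : pvOpenerOf a = some o) (hh : st.head? = some o) :
    pvStep st a = st.tail := by
  unfold pvStep; rw [h]; simp [hh]

theorem pvStep_push (a o : Char) (st : List Char) (h : pvOpenerOf a = some o) (hh : st.head? ≠ some o) :
    pvStep st a = a :: st := by
  unfold pvStep; rw [h]; simp [hh]

-- fully reduced form of s: all adjacent matched bracket pairs cancelled
def pvRed (s : List Char) : List Char := (s.foldl pvStep []).reverse

def pvIsCloser (c : Char) : Bool := (pvOpenerOf c).isSome

def pvIsBreak (c : Char) : Bool := c == '\n' || c == '\r'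

-- splitlines' break-character test (definitionally the one inside PySem.Chars.splitlines)
def pvIsB : Char → Bool := fun c =>
  decide (c.toNat = 10) || decide (c.toNat = 13) || decide (c.toNat = 11) || decide (c.toNat = 12) ||
    decide (c.toNat = 28) || decide (c.toNat = 29) || decide (c.toNat = 30) || decide (c.toNat = 133) ||
    decide (c.toNat = 8232) || decide (c.toNat = 8233)

def pvScoreOpt : Option Char → Int
  | some c => pvScoreOf c
  | none => 0

-- A's per-row contribution
def pvRowA (row : List Char) : Int :=
  if pvRowP row then (PySem.Dict.get? pvScores (pvRowC row)).getD 0 else 0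

theorem pvRowA_pos (row : List Char) (h : pvRowP row = true) :
    pvRowA row = (PySem.Dict.get? pvScores (pvRowC row)).getD 0 := by
  unfold pvRowA; rw [h]; rfl

theorem pvRowA_neg (row : List Char) (h : pvRowP row = false) : pvRowA row = 0 := by
  unfold pvRowA; rw [h]; rfl

def pvSumf (f : List Char → Int) (s : List Char) : Int := ((PySem.Chars.splitlines s).map f).sum

theorem pvSplitlines_eq (s : List Char) :
    PySem.Chars.splitlines s = PySem.Chars.splitlines.go pvIsB s [] [] := rfl

-- ---- block lemma: a character that is not an opener freezes everything below it ----

theorem pvStep_block (b : Char) (hb : ∀ c, pvOpenerOf c ≠ some b) :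
    ∀ (t p q : List Char), List.foldl pvStep (p ++ b :: q) t = List.foldl pvStep p t ++ b :: q := by
  intro t
  induction t with
  | nil => intro p q; simp
  | cons c t' ih =>
    intro p q
    have hstep : pvStep (p ++ b :: q) c = pvStep p c ++ b :: q := by
      cases hoc : pvOpenerOf c with
      | none => rw [pvStep_none c _ hoc, pvStep_none c _ hoc]; rfl
      | some o =>
        cases p with
        | nil =>
          have hbo : b ≠ o := by
            intro h
            exact hb c (h ▸ hoc)
          rw [pvStep_push c o _ hoc (by simp [hbo]), pvStep_push c o _ hoc (by simp)]
          rfl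
        | cons h p' =>
          by_cases hho : h = o
          · subst hho
            rw [pvStep_pop c h _ hoc (by simp), pvStep_pop c h _ hoc (by simp)]
            rfl
          · rw [pvStep_push c o _ hoc (by simp [hho]), pvStep_push c o _ hoc (by simp [hho])]
            rfl
    simp only [List.foldl_cons, hstep]
    exact ih (pvStep p c) q

-- characters of the folded stack come from the initial stack or the input
theorem pvStep_mem : ∀ (l st : List Char) (c : Char), c ∈ List.foldl pvStep st l → c ∈ st ∨ c ∈ l := by
  intro l
  induction l with
  | nil => intro st c h; exact Or.inl h
  | cons a t ih =>
    intro st c h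
    rcases ih (pvStep st a) c h with h1 | h1
    · have : c ∈ st ∨ c = a := by
        cases hoc : pvOpenerOf a with
        | none =>
          rw [pvStep_none a st hoc] at h1
          rcases List.mem_cons.mp h1 with h2 | h2
          · exact Or.inr h2
          · exact Or.inl h2
        | some o =>
          by_cases hh : st.head? = some o
          · rw [pvStep_pop a o st hoc hh] at h1
            exact Or.inl (List.mem_of_mem_tail h1)
          · rw [pvStep_push a o st hoc hh] at h1
            rcases List.mem_cons.mp h1 with h2 | h2
            · exact Or.inr h2
            · exact Or.inl h2
      rcases this with h2 | h2
      · exact Or.inl h2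
      · exact Or.inr (by simp [h2])
    · exact Or.inr (List.mem_cons_of_mem _ h1)

-- ---- replace passes preserve the fold ----

theorem pvFoldGoPair (o c : Char) (ho : pvOpenerOf o = none) (hc : pvOpenerOf c = some o) :
    ∀ (fuel : Nat) (l acc st : List Char),
      List.foldl pvStep st (PySem.Chars.replace.go [o, c] [] fuel l acc) =
        List.foldl pvStep (List.foldl pvStep st acc.reverse) l := by
  intro fuel
  induction fuel with
  | zero =>
    intro l acc st
    show List.foldl pvStep st (acc.reverse ++ l) = _
    rw [List.foldl_append]
  | succ n ih =>
    intro l acc st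
    cases l with
    | nil => show List.foldl pvStep st acc.reverse = _; simp
    | cons c0 t =>
      show List.foldl pvStep st
          (if [o, c].isPrefixOf (c0 :: t) then
             PySem.Chars.replace.go [o, c] [] n (List.drop [o, c].length (c0 :: t)) (List.reverse [] ++ acc)
           else PySem.Chars.replace.go [o, c] [] n t (c0 :: acc)) = _
      split
      · rename_i hpre
        obtain ⟨r, hr⟩ := List.isPrefixOf_iff_prefix.mp hpre
        have hc0 : c0 = o := by
          have := congrArg (fun l => l.head?) hr
          simpa using this.symm
        have ht : t = c :: r := by
          have := congrArg List.tail hr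
          simpa using this.symm
        rw [ih, hc0, ht]
        simp [pvStep, ho, hc]
      · rw [ih]
        simp [List.foldl_append]

theorem pvFoldReplace (o c : Char) (ho : pvOpenerOf o = none) (hc : pvOpenerOf c = some o)
    (s st : List Char) :
    List.foldl pvStep st (PySem.Chars.replace s [o, c] []) = List.foldl pvStep st s := by
  have h : PySem.Chars.replace s [o, c] [] = PySem.Chars.replace.go [o, c] [] s.length s [] := by
    simp [PySem.Chars.replace]
  rw [h, pvFoldGoPair o c ho hc]
  simp

theorem pvFoldCleanPass (s st : List Char) :
    List.foldl pvStep st (pvCleanPass s) = List.foldl pvStep st s := by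
  unfold pvCleanPass
  rw [pvFoldReplace '[' ']' rfl rfl, pvFoldReplace '<' '>' rfl rfl,
    pvFoldReplace '{' '}' rfl rfl, pvFoldReplace '(' ')' rfl rfl]

-- ---- a length-preserving replace pass is the identity and certifies absence of the pair ----

theorem pvGoEq (o c : Char) : ∀ (fuel : Nat) (l acc : List Char),
    (PySem.Chars.replace.go [o, c] [] fuel l acc).length = acc.length + l.length →
    PySem.Chars.replace.go [o, c] [] fuel l acc = acc.reverse ++ l := by
  intro fuel
  induction fuel with
  | zero => intro l acc _; rfl
  | succ n ih =>
    intro l acc h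
    cases l with
    | nil =>
      show (acc.reverse : List Char) = acc.reverse ++ []
      simp
    | cons c0 t =>
      rw [show PySem.Chars.replace.go [o, c] [] (n+1) (c0 :: t) acc =
          (if [o, c].isPrefixOf (c0 :: t) then
             PySem.Chars.replace.go [o, c] [] n (List.drop [o, c].length (c0 :: t)) (List.reverse [] ++ acc)
           else PySem.Chars.replace.go [o, c] [] n t (c0 :: acc)) from rfl] at h ⊢
      split at h
      · rename_i hpre
        exfalso
        have hle := pvReplaceGoLen [o, c] n (List.drop [o, c].length (c0 :: t)) (List.reverse [] ++ acc)
        have h2 : 2 ≤ (c0 :: t).length := (List.isPrefixOf_iff_prefix.mp hpre).length_le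
        simp only [List.length_drop, List.reverse_nil, List.nil_append, List.length_nil,
          List.length_cons] at hle h h2
        omega
      · rw [if_neg (by rename_i hnp; exact hnp)]
        have := ih t (c0 :: acc) (by simpa [Nat.add_comm, Nat.add_assoc, Nat.add_left_comm] using h)
        rw [this]
        simp

theorem pvGoInfix (o c : Char) : ∀ (fuel : Nat) (l acc : List Char), l.length ≤ fuel →
    [o, c] <:+: l → (PySem.Chars.replace.go [o, c] [] fuel l acc).length < acc.length + l.length := by
  intro fuel
  induction fuel with
  | zero =>
    intro l acc hlen hinf
    interval_cases h : l.length
    · exact absurd (List.eq_nil_of_length_eq_zero h ▸ hinf) (by simp)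
  | succ n ih =>
    intro l acc hlen hinf
    cases l with
    | nil => exact absurd hinf (by simp)
    | cons c0 t =>
      rw [show PySem.Chars.replace.go [o, c] [] (n+1) (c0 :: t) acc =
          (if [o, c].isPrefixOf (c0 :: t) then
             PySem.Chars.replace.go [o, c] [] n (List.drop [o, c].length (c0 :: t)) (List.reverse [] ++ acc)
           else PySem.Chars.replace.go [o, c] [] n t (c0 :: acc)) from rfl]
      split
      · rename_i hpre
        have hle := pvReplaceGoLen [o, c] n (List.drop [o, c].length (c0 :: t)) (List.reverse [] ++ acc)
        have h2 : 2 ≤ (c0 :: t).length := (List.isPrefixOf_iff_prefix.mp hpre).length_le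
        simp only [List.length_drop, List.reverse_nil, List.nil_append, List.length_nil,
          List.length_cons] at hle h2 ⊢
        omega
      · rename_i hnp
        have hinf' : [o, c] <:+: t := by
          rcases List.infix_cons_iff.mp hinf with h1 | h1
          · exact absurd (List.isPrefixOf_iff_prefix.mpr h1) hnp
          · exact h1
        have := ih t (c0 :: acc) (by simpa using hlen) hinf'
        simp only [List.length_cons] at this ⊢
        omega

theorem pvReplaceLenEq (s : List Char) (o c : Char)
    (h : (PySem.Chars.replace s [o, c] []).length = s.length) :
    PySem.Chars.replace s [o, c] [] = s ∧ ¬ [o, c] <:+: s := by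
  have hrep : PySem.Chars.replace s [o, c] [] = PySem.Chars.replace.go [o, c] [] s.length s [] := by
    simp [PySem.Chars.replace]
  rw [hrep] at h ⊢
  constructor
  · simpa using pvGoEq o c s.length s [] (by simpa using h)
  · intro hinf
    have := pvGoInfix o c s.length s [] le_rfl hinf
    simp at this
    omega

-- ---- a pair-free string folds to itself ----

def pvPairfree (t : List Char) : Prop :=
  ¬ ['(', ')'] <:+: t ∧ ¬ ['{', '}'] <:+: t ∧ ¬ ['<', '>'] <:+: t ∧ ¬ ['[', ']'] <:+: t

theorem pvPairTail (a : Char) (t : List Char) (h : pvPairfree (a :: t)) : pvPairfree t := by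
  obtain ⟨h1, h2, h3, h4⟩ := h
  exact ⟨fun hx => h1 (List.infix_cons_iff.mpr (Or.inr hx)),
    fun hx => h2 (List.infix_cons_iff.mpr (Or.inr hx)),
    fun hx => h3 (List.infix_cons_iff.mpr (Or.inr hx)),
    fun hx => h4 (List.infix_cons_iff.mpr (Or.inr hx))⟩

theorem pvPairfreeFoldAux : ∀ (t : List Char) (a : Char) (st' : List Char), pvPairfree (a :: t) →
    List.foldl pvStep (a :: st') t = t.reverse ++ (a :: st') := by
  intro t
  induction t with
  | nil => intro a st' _; simp
  | cons c t' ih =>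
    intro a st' hpf
    have hstep : pvStep (a :: st') c = c :: a :: st' := by
      cases hoc : pvOpenerOf c with
      | none => exact pvStep_none c _ hoc
      | some o =>
        refine pvStep_push c o _ hoc ?_
        simp only [List.head?_cons]
        intro hao
        rw [Option.some_inj] at hao
        subst hao
        obtain ⟨h1, h2, h3, h4⟩ := hpf
        have hoc' := hoc
        unfold pvOpenerOf at hoc'
        split_ifs at hoc' with hc1 hc2 hc3 hc4 <;>
          (simp only [Option.some_inj] at hoc'
           subst hoc'
           first
           | exact h1 (by subst hc1; exact ⟨[], t', by simp⟩)
           | exact h4 (by subst hc2; exact ⟨[], t', by simp⟩)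
           | exact h2 (by subst hc3; exact ⟨[], t', by simp⟩)
           | exact h3 (by subst hc4; exact ⟨[], t', by simp⟩))
    simp only [List.foldl_cons, hstep]
    rw [ih c (a :: st') (pvPairTail a _ hpf)]
    simp

theorem pvPairfreeFold : ∀ (t : List Char), pvPairfree t → List.foldl pvStep [] t = t.reverse := by
  intro t hpf
  cases t with
  | nil => rfl
  | cons a t'' =>
    have hstep : pvStep [] a = [a] := by
      cases hoc : pvOpenerOf a with
      | none => exact pvStep_none a _ hoc
      | some o => exact pvStep_push a o _ hoc (by simp)
    simp only [List.foldl_cons, hstep]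
    rw [pvPairfreeFoldAux t'' a [] hpf]
    simp

-- ---- clean_string computes pvRed ----

theorem pvCleanGoRed (s : List Char) : pvCleanGo s = pvRed s := by
  induction s using pvCleanGo.induct with
  | case1 s h =>
    rw [pvCleanGo, if_pos h]
    -- the pass kept the length, so each of the four replaces kept it, each is the identity,
    -- and s contains none of the four bracket pairs
    unfold pvCleanPass at h ⊢
    have l1 := pvReplaceLen s '(' ')'
    have l2 := pvReplaceLen (PySem.Chars.replace s ['(', ')'] []) '{' '}'
    have l3 := pvReplaceLen (PySem.Chars.replace (PySem.Chars.replace s ['(', ')'] []) ['{', '}'] []) '<' '>'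
    have l4 := pvReplaceLen (PySem.Chars.replace (PySem.Chars.replace (PySem.Chars.replace s ['(', ')'] []) ['{', '}'] []) ['<', '>'] []) '[' ']'
    obtain ⟨e1, n1⟩ := pvReplaceLenEq s '(' ')' (by omega)
    rw [e1] at h l2 l3 l4 ⊢
    obtain ⟨e2, n2⟩ := pvReplaceLenEq s '{' '}' (by omega)
    rw [e2] at h l3 l4 ⊢
    obtain ⟨e3, n3⟩ := pvReplaceLenEq s '<' '>' (by omega)
    rw [e3] at h l4 ⊢
    obtain ⟨e4, n4⟩ := pvReplaceLenEq s '[' ']' (by omega)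
    rw [e4]
    unfold pvRed
    rw [pvPairfreeFold s ⟨n1, n2, n3, n4⟩]
    simp
  | case2 s h ih =>
    rw [pvCleanGo, if_neg h, ih]
    unfold pvRed
    rw [pvFoldCleanPass]

-- ---- splitlines lemmas ----

theorem pvG_nil (cur : List Char) (accl : List (List Char)) :
    PySem.Chars.splitlines.go pvIsB [] cur accl =
      if cur.isEmpty then accl.reverse else (cur.reverse :: accl).reverse := rfl

theorem pvG_crlf (rest cur : List Char) (accl : List (List Char)) :
    PySem.Chars.splitlines.go pvIsB ('\r' :: '\n' :: rest) cur accl =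
      PySem.Chars.splitlines.go pvIsB rest [] (cur.reverse :: accl) := rfl

theorem pvG_cons2 (c : Char) (t cur : List Char) (accl : List (List Char))
    (h : ¬ (c = '\r' ∧ t.head? = some '\n')) :
    PySem.Chars.splitlines.go pvIsB (c :: t) cur accl =
      if pvIsB c then PySem.Chars.splitlines.go pvIsB t [] (cur.reverse :: accl)
      else PySem.Chars.splitlines.go pvIsB t (c :: cur) accl := by
  rw [PySem.Chars.splitlines.go.eq_def]
  split
  · rename_i heq; exact absurd heq (by simp)
  · rename_i rest heq
    injection heq with h1 h2
    exact absurd ⟨h1, by rw [h2]; rfl⟩ h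
  · rename_i heq
    injection heq with h1 h2
    rw [h1, h2]

theorem pvG_accN : ∀ (n : Nat) (s : List Char), s.length ≤ n → ∀ (cur : List Char) (accl : List (List Char)),
    PySem.Chars.splitlines.go pvIsB s cur accl = accl.reverse ++ PySem.Chars.splitlines.go pvIsB s cur [] := by
  intro n
  induction n with
  | zero =>
    intro s hs cur accl
    have hnil : s = [] := List.eq_nil_of_length_eq_zero (Nat.le_zero.mp hs)
    subst hnil
    rw [pvG_nil, pvG_nil]
    split_ifs <;> simp
  | succ n ih =>
    intro s hs cur accl
    cases s with
    | nil => rw [pvG_nil, pvG_nil]; split_ifs <;> simp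
    | cons c t =>
      by_cases hcr : c = '\r' ∧ t.head? = some '\n'
      · obtain ⟨hc, hh⟩ := hcr
        subst hc
        obtain ⟨t', ht⟩ : ∃ t', t = '\n' :: t' := by
          cases t with
          | nil => simp at hh
          | cons a b => simp at hh; exact ⟨b, by rw [hh]⟩
        subst ht
        rw [pvG_crlf, pvG_crlf]
        rw [ih t' (by simp at hs; omega) [] (cur.reverse :: accl),
          ih t' (by simp at hs; omega) [] [cur.reverse]]
        simp
      · rw [pvG_cons2 c t cur accl hcr, pvG_cons2 c t cur [] hcr]
        split_ifs with hb
        · rw [ih t (by simp at hs; omega) [] (cur.reverse :: accl),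
            ih t (by simp at hs; omega) [] [cur.reverse]]
          simp
        · rw [ih t (by simp at hs; omega) (c :: cur) accl]

theorem pvG_nonbreak : ∀ (x : List Char), (∀ c ∈ x, pvIsB c = false) →
    ∀ (y cur : List Char) (acc : List (List Char)),
      PySem.Chars.splitlines.go pvIsB (x ++ y) cur acc = PySem.Chars.splitlines.go pvIsB y (x.reverse ++ cur) acc := by
  intro x
  induction x with
  | nil => intro _ y cur acc; simp
  | cons c x' ih =>
    intro hx y cur acc
    have hc : pvIsB c = false := hx c (List.mem_cons_self ..)
    have hcr : ¬ (c = '\r' ∧ (x' ++ y).head? = some '\n') := by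
      rintro ⟨h1, -⟩
      rw [h1] at hc
      exact absurd hc (by decide)
    rw [List.cons_append, pvG_cons2 c (x' ++ y) cur acc hcr, if_neg (by rw [hc]; simp)]
    rw [ih (fun d hd => hx d (List.mem_cons_of_mem _ hd)) y (c :: cur) acc]
    simp

theorem pvSL_nobreak (x : List Char) (hx : ∀ c ∈ x, pvIsB c = false) :
    PySem.Chars.splitlines x = if x = [] then [] else [x] := by
  rw [pvSplitlines_eq]
  conv_lhs => rw [← List.append_nil x]
  rw [pvG_nonbreak x hx [] [] [], pvG_nil]
  by_cases hx0 : x = []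
  · subst hx0; simp
  · simp [hx0]

theorem pvSumCons (f : List Char → Int) (hf : f [] = 0) (w v : List Char) (b : Char)
    (hw : ∀ c ∈ w, pvIsB c = false) (hb : b = '\n' ∨ b = '\r') :
    pvSumf f (w ++ b :: v) = f w + pvSumf f v := by
  unfold pvSumf
  rw [pvSplitlines_eq (w ++ b :: v), pvG_nonbreak w hw (b :: v) [] []]
  rcases hb with hb | hb <;> subst hb
  · rw [pvG_cons2 '\n' v (w.reverse ++ []) [] (by simp), if_pos (by decide),
      pvG_accN v.length v le_rfl]
    simp [pvSplitlines_eq]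
  · by_cases hv : v.head? = some '\n'
    · obtain ⟨v', hv'⟩ : ∃ v', v = '\n' :: v' := by
        cases v with
        | nil => simp at hv
        | cons a b => simp at hv; exact ⟨b, by rw [hv]⟩
      subst hv'
      rw [pvG_crlf, pvG_accN v'.length v' le_rfl]
      rw [pvSplitlines_eq ('\n' :: v'), pvG_cons2 '\n' v' [] [] (by simp), if_pos (by decide)]
      rw [pvG_accN v'.length v' le_rfl]
      simp only [List.map_append, List.sum_append, List.map_nil, List.reverse_nil,
        List.append_nil, List.reverse_reverse, List.sum_nil]
      conv_rhs => rw [pvG_accN v'.length v' le_rfl]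
      simp [hf]
    · rw [pvG_cons2 '\r' v (w.reverse ++ []) [] (by simp [hv]), if_pos (by decide),
        pvG_accN v.length v le_rfl]
      simp [pvSplitlines_eq]

-- ---- B's scan finds the first closer of the reduced line ----

theorem pvCloserNotOpener (ch o : Char) (h : pvOpenerOf ch = some o) :
    ∀ c', pvOpenerOf c' ≠ some ch := by
  intro c' hc'
  unfold pvOpenerOf at hc'
  split_ifs at hc' with h1 h2 h3 h4 <;>
    (rw [Option.some_inj] at hc'; subst hc'; simp [pvOpenerOf] at h)

theorem pvFindNoneRev (st : List Char) (h : ∀ c ∈ st, pvIsCloser c = false) :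
    List.find? pvIsCloser st.reverse = none := by
  rw [List.find?_eq_none]
  intro x hx
  rw [h x (List.mem_reverse.mp hx)]
  simp

theorem pvScanSpec : ∀ (l st : List Char), (∀ c ∈ st, pvIsCloser c = false) →
    pvScanLine l st = pvScoreOpt (List.find? pvIsCloser (List.foldl pvStep st l).reverse) := by
  intro l
  induction l with
  | nil =>
    intro st h
    simp only [pvScanLine, List.foldl_nil]
    rw [pvFindNoneRev st h]
    rfl
  | cons ch rest ih =>
    intro st h
    cases hoc : pvOpenerOf ch with
    | none =>
      have hcl : pvIsCloser ch = false := by unfold pvIsCloser; rw [hoc]; rfl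
      simp only [pvScanLine, hoc, List.foldl_cons, pvStep_none ch st hoc]
      exact ih (ch :: st) (by
        intro c hc
        rcases List.mem_cons.mp hc with h1 | h1
        · rw [h1]; exact hcl
        · exact h c h1)
    | some o =>
      by_cases hh : st.head? = some o
      · simp only [pvScanLine, hoc, if_pos hh, List.foldl_cons, pvStep_pop ch o st hoc hh]
        exact ih st.tail (fun c hc => h c (List.mem_of_mem_tail hc))
      · simp only [pvScanLine, hoc, if_neg hh, List.foldl_cons, pvStep_push ch o st hoc hh]
        have hblock := pvStep_block ch (pvCloserNotOpener ch o hoc) rest [] st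
        simp only [List.nil_append] at hblock
        rw [hblock]
        have hcl : pvIsCloser ch = true := by unfold pvIsCloser; rw [hoc]; rfl
        rw [List.reverse_append, List.reverse_cons, List.append_assoc]
        rw [List.find?_append, pvFindNoneRev st (fun c hc => h c hc)]
        simp [hcl, pvScoreOpt]

-- ---- A's row computation finds the first closer of the row ----

theorem pvSingPrefix (c : Char) (z : List Char) : [c] <+: z ↔ z.head? = some c := by
  cases z with
  | nil => simp
  | cons a t => simp [List.cons_prefix_cons, eq_comm]

theorem pvFindCharGe (row : List Char) (c : Char) (k : Nat)
    (hmin : ∀ i < k, row[i]? ≠ some c) :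
    PySem.Chars.find row [c] = -1 ∨
      ((k : Int) ≤ PySem.Chars.find row [c] ∧ row[(PySem.Chars.find row [c]).toNat]? = some c) := by
  by_cases h0 : 0 ≤ PySem.Chars.find row [c]
  · obtain ⟨hpre, _⟩ := PySem.Chars.find_spec h0
    have hidx : row[(PySem.Chars.find row [c]).toNat]? = some c := by
      rw [← List.head?_drop]
      exact (pvSingPrefix c _).mp hpre
    refine Or.inr ⟨?_, hidx⟩
    have hkk : ¬ (PySem.Chars.find row [c]).toNat < k := fun hlt => hmin _ hlt hidx
    omega
  · have := PySem.Chars.neg_one_le_find row [c]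
    omega

theorem pvFindCharEq (row : List Char) (c : Char) (k : Nat)
    (hk : row[k]? = some c) (hmin : ∀ i < k, row[i]? ≠ some c) :
    PySem.Chars.find row [c] = (k : Int) := by
  have hne : PySem.Chars.find row [c] ≠ -1 := by
    rw [PySem.Chars.find_ne_neg_one_iff]
    obtain ⟨u, t, hut⟩ := List.append_of_mem (List.mem_of_getElem? hk)
    exact ⟨u, t, by rw [hut]; simp⟩
  have h0 : 0 ≤ PySem.Chars.find row [c] := by
    have := PySem.Chars.neg_one_le_find row [c]
    omega
  obtain ⟨hpre, hminf⟩ := PySem.Chars.find_spec h0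
  have hidx : row[(PySem.Chars.find row [c]).toNat]? = some c := by
    rw [← List.head?_drop]
    exact (pvSingPrefix c _).mp hpre
  have h1 : ¬ (PySem.Chars.find row [c]).toNat < k := fun hlt => hmin _ hlt hidx
  have h2 : ¬ k < (PySem.Chars.find row [c]).toNat := by
    intro hlt
    exact hminf k hlt ((pvSingPrefix c _).mpr (by rw [List.head?_drop]; exact hk))
  omega

theorem pvRowSpec (row : List Char) : pvRowA row = pvScoreOpt (List.find? pvIsCloser row) := by
  cases hf : List.find? pvIsCloser row with
  | none =>
    have hall := List.find?_eq_none.mp hf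
    have hnone : ∀ c : Char, pvIsCloser c = true → PySem.Chars.find row [c] = -1 := by
      intro c hc
      rw [PySem.Chars.find_eq_neg_one_iff]
      intro hinf
      exact absurd hc (by simpa using hall c (hinf.subset (by simp)))
    have hnp : pvRowP row = false := by
      unfold pvRowP pvRowIndexes
      rw [show ([']', '>', '}', ')'].map (fun ch => PySem.Chars.find row [ch])) = [-1, -1, -1, -1] by
        simp [hnone ']' (by decide), hnone '>' (by decide), hnone '}' (by decide), hnone ')' (by decide)]]
      rw [PySem.List.max?_id_cons]
      decide
    rw [pvRowA_neg row hnp]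
    rfl
  | some d =>
    obtain ⟨hd, as, bs, hrow, has⟩ := List.find?_eq_some_iff_append.mp hf
    have hk : row[as.length]? = some d := by
      rw [hrow, List.getElem?_append_right (le_refl as.length)]
      simp
    have hmin : ∀ c : Char, pvIsCloser c = true → ∀ i < as.length, row[i]? ≠ some c := by
      intro c hc i hi hcon
      rw [hrow, List.getElem?_append_left hi] at hcon
      have hmem : c ∈ as := List.mem_of_getElem? hcon
      have := has c hmem
      rw [hc] at this
      exact Bool.noConfusion this
    have hjd : PySem.Chars.find row [d] = (as.length : Int) :=
      pvFindCharEq row d as.length hk (hmin d hd)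
    have hge : ∀ c : Char, pvIsCloser c = true →
        PySem.Chars.find row [c] = -1 ∨ (as.length : Int) ≤ PySem.Chars.find row [c] :=
      fun c hc => (pvFindCharGe row c as.length (hmin c hc)).imp id And.left
    have hd4 : d = ')' ∨ d = ']' ∨ d = '}' ∨ d = '>' := by
      by_contra hcon
      push Not at hcon
      obtain ⟨n1, n2, n3, n4⟩ := hcon
      unfold pvIsCloser pvOpenerOf at hd
      rw [if_neg n1, if_neg n2, if_neg n3, if_neg n4] at hd
      simp at hd
    have hmem_k : (as.length : Int) ∈
        [PySem.Chars.find row [']'], PySem.Chars.find row ['>'], PySem.Chars.find row ['}'],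
          PySem.Chars.find row [')']] := by
      rcases hd4 with h | h | h | h <;> (subst h; rw [← hjd]; simp)
    have hbound : ∀ j : Int, j ∈
        [PySem.Chars.find row [']'], PySem.Chars.find row ['>'], PySem.Chars.find row ['}'],
          PySem.Chars.find row [')']] → j = -1 ∨ (as.length : Int) ≤ j := by
      intro j hj
      rcases List.mem_cons.mp hj with h | hj
      · rw [h]; exact hge ']' (by decide)
      rcases List.mem_cons.mp hj with h | hj
      · rw [h]; exact hge '>' (by decide)
      rcases List.mem_cons.mp hj with h | hj
      · rw [h]; exact hge '}' (by decide)
      rcases List.mem_cons.mp hj with h | hj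
      · rw [h]; exact hge ')' (by decide)
      · cases hj
    have hmax : (0 : Int) ≤ (PySem.List.max? [PySem.Chars.find row [']'], PySem.Chars.find row ['>'],
        PySem.Chars.find row ['}'], PySem.Chars.find row [')']] (fun i => i)).getD (-1) := by
      rw [PySem.List.max?_id_cons, Option.getD_some]
      have hfm := PySem.List.le_foldl_max [PySem.Chars.find row ['>'], PySem.Chars.find row ['}'],
        PySem.Chars.find row [')']] (PySem.Chars.find row [']'])
      have hkle : (as.length : Int) ≤ List.foldl max (PySem.Chars.find row [']'])
          [PySem.Chars.find row ['>'], PySem.Chars.find row ['}'], PySem.Chars.find row [')']] := by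
        rcases List.mem_cons.mp hmem_k with h | h
        · rw [h]; exact hfm.1
        · exact hfm.2 _ h
      omega
    have hP : pvRowP row = true := by
      unfold pvRowP pvRowIndexes
      simp only [List.map_cons, List.map_nil]
      exact decide_eq_true hmax
    have hkF : (as.length : Int) ∈ ([PySem.Chars.find row [']'], PySem.Chars.find row ['>'],
        PySem.Chars.find row ['}'], PySem.Chars.find row [')']].filter (fun i => decide (0 ≤ i))) :=
      List.mem_filter.mpr ⟨hmem_k, by simp⟩
    obtain ⟨m, hm⟩ : ∃ m, PySem.List.min? ([PySem.Chars.find row [']'], PySem.Chars.find row ['>'],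
        PySem.Chars.find row ['}'], PySem.Chars.find row [')']].filter (fun i => decide (0 ≤ i)))
        (fun i => i) = some m := by
      cases hmq : PySem.List.min? ([PySem.Chars.find row [']'], PySem.Chars.find row ['>'],
          PySem.Chars.find row ['}'], PySem.Chars.find row [')']].filter (fun i => decide (0 ≤ i)))
          (fun i => i) with
      | none =>
        rw [PySem.List.min?_eq_none_iff] at hmq
        rw [hmq] at hkF
        cases hkF
      | some m => exact ⟨m, rfl⟩
    have hmF := PySem.List.min?_mem hm
    have hmidx := (List.mem_filter.mp hmF).1
    have hkm : (as.length : Int) ≤ m := by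
      rcases hbound m hmidx with h | h
      · have hm0 : (0 : Int) ≤ m := by simpa using (List.mem_filter.mp hmF).2
        omega
      · exact h
    have hmk : m ≤ (as.length : Int) := PySem.List.min?_isMin hm _ hkF
    have hmeq : m = (as.length : Int) := le_antisymm hmk hkm
    have hC : pvRowC row = d := by
      unfold pvRowC pvRowIndexes
      simp only [List.map_cons, List.map_nil]
      rw [hm, Option.getD_some, hmeq, PySem.List.pyGet?_natCast row as.length, hk, Option.getD_some]
    rw [pvRowA_pos row hP, hC]
    rcases hd4 with h | h | h | h <;> subst h <;> rfl

-- ---- the per-line bridge ----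

theorem pvPerLine (l : List Char) : pvRowA (pvRed l) = pvScanLine l [] := by
  rw [pvRowSpec, pvScanSpec l [] (by intro c hc; cases hc)]
  rfl

-- ---- main sum lemma ----

theorem pvDropHead (p : Char → Bool) : ∀ (l : List Char) (b : Char) (y : List Char),
    l.dropWhile p = b :: y → p b = false := by
  intro l
  induction l with
  | nil => intro b y h; cases h
  | cons a t ih =>
    intro b y h
    rw [List.dropWhile_cons] at h
    split at h
    · exact ih b y h
    · rename_i hpa
      injection h with h1 _
      subst h1
      simpa using hpa

theorem pvNLorCR (c : Char) (hdom : pvDomChar c = true) (hb : pvIsB c = true) :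
    c = '\n' ∨ c = '\r' := by
  have h10 : c.toNat = 10 ∨ c.toNat = 13 := by
    unfold pvDomChar at hdom
    unfold pvIsB at hb
    simp only [Bool.or_eq_true, Bool.and_eq_true, decide_eq_true_eq, beq_iff_eq] at hdom hb
    omega
  have hval : c.val.toNat = 10 ∨ c.val.toNat = 13 := h10
  rcases hval with h | h
  · exact Or.inl (Char.ext (by
      have : c.val = ('\n' : Char).val := by
        apply UInt32.toNat_inj.mp
        simpa using h
      exact this))
  · exact Or.inr (Char.ext (by
      have : c.val = ('\r' : Char).val := by
        apply UInt32.toNat_inj.mp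
        simpa using h
      exact this))

theorem pvMain : ∀ (n : Nat) (s : List Char), s.length ≤ n → (∀ c ∈ s, pvDomChar c = true) →
    pvSumf pvRowA (pvRed s) = pvSumf (fun l => pvScanLine l []) s := by
  intro n
  induction n with
  | zero =>
    intro s hs _
    have hnil : s = [] := List.eq_nil_of_length_eq_zero (Nat.le_zero.mp hs)
    subst hnil
    rfl
  | succ n ih =>
    intro s hs hdom
    have hsplit : s.takeWhile (fun c => !pvIsB c) ++ s.dropWhile (fun c => !pvIsB c) = s :=
      List.takeWhile_append_dropWhile
    have hxfree : ∀ c ∈ s.takeWhile (fun c => !pvIsB c), pvIsB c = false := by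
      intro c hc
      have := List.mem_takeWhile_imp hc
      simpa using this
    cases hr : s.dropWhile (fun c => !pvIsB c) with
    | nil =>
      have hsx : s = s.takeWhile (fun c => !pvIsB c) := by
        conv_lhs => rw [← hsplit]
        rw [hr, List.append_nil]
      have hsfree : ∀ c ∈ s, pvIsB c = false := fun c hc => hxfree c (hsx ▸ hc)
      have hredfree : ∀ c ∈ pvRed s, pvIsB c = false := by
        intro c hc
        unfold pvRed at hc
        rcases pvStep_mem s [] c (List.mem_reverse.mp hc) with h | h
        · cases h
        · exact hsfree c h
      unfold pvSumf
      rw [pvSL_nobreak (pvRed s) hredfree, pvSL_nobreak s hsfree]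
      by_cases h0 : s = []
      · subst h0; rfl
      · rw [if_neg h0]
        have hperl := pvPerLine s
        by_cases hr0 : pvRed s = []
        · rw [if_pos hr0]
          rw [hr0] at hperl
          rw [pvRowSpec] at hperl
          simp only [List.map_nil, List.sum_nil, List.map_cons, List.sum_cons]
          rw [← hperl]
          rfl
        · rw [if_neg hr0]
          simp only [List.map_cons, List.map_nil, List.sum_cons, List.sum_nil]
          rw [hperl]
    | cons b y =>
      have hb : pvIsB b = true := by
        have := pvDropHead (fun c => !pvIsB c) s b y hr
        simpa using this
      have hbmem : b ∈ s := by
        rw [← hsplit, hr]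
        exact List.mem_append_right _ (List.mem_cons_self ..)
      have hb2 : b = '\n' ∨ b = '\r' := pvNLorCR b (hdom b hbmem) hb
      have hno : pvOpenerOf b = none := by rcases hb2 with h | h <;> subst h <;> rfl
      have hnotop : ∀ c', pvOpenerOf c' ≠ some b := by
        intro c' hc'
        unfold pvOpenerOf at hc'
        split_ifs at hc' <;>
          first
          | exact Option.noConfusion hc'
          | (rcases hb2 with h | h <;> (subst h; exact absurd hc' (by decide)))
      have hs' : s = s.takeWhile (fun c => !pvIsB c) ++ b :: y := by
        conv_lhs => rw [← hsplit]
        rw [hr]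
      have hred : List.foldl pvStep [] s =
          List.foldl pvStep [] y ++ b :: List.foldl pvStep [] (s.takeWhile (fun c => !pvIsB c)) := by
        conv_lhs => rw [hs']
        rw [List.foldl_append, List.foldl_cons, pvStep_none b _ hno]
        have := pvStep_block b hnotop y [] (List.foldl pvStep [] (s.takeWhile (fun c => !pvIsB c)))
        simpa using this
      have hredeq : pvRed s = pvRed (s.takeWhile (fun c => !pvIsB c)) ++ b :: pvRed y := by
        unfold pvRed
        rw [hred]
        simp
      have hredxfree : ∀ c ∈ pvRed (s.takeWhile (fun c => !pvIsB c)), pvIsB c = false := by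
        intro c hc
        unfold pvRed at hc
        rcases pvStep_mem _ [] c (List.mem_reverse.mp hc) with h | h
        · cases h
        · exact hxfree c h
      have hydom : ∀ c ∈ y, pvDomChar c = true := by
        intro c hc
        exact hdom c (by rw [hs']; exact List.mem_append_right _ (List.mem_cons_of_mem _ hc))
      have hylen : y.length ≤ n := by
        have hlen := congrArg List.length hs'
        simp only [List.length_append, List.length_cons] at hlen
        omega
      rw [hredeq]
      rw [pvSumCons pvRowA (by rw [pvRowSpec]; rfl) _ _ b hredxfree hb2]
      conv_rhs => rw [hs']
      rw [pvSumCons (fun l => pvScanLine l []) rfl _ _ b hxfree hb2]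
      rw [ih y hylen hydom, pvPerLine]

theorem pvFilterMapSum : ∀ (rows : List (List Char)),
    (((rows.filter pvRowP).map pvRowC).map
        (fun ch => (PySem.Dict.get? pvScores ch).getD 0)).sum
      = (rows.map pvRowA).sum := by
  intro rows
  induction rows with
  | nil => rfl
  | cons r t ih =>
    rw [List.filter_cons]
    cases h : pvRowP r
    · rw [if_neg (by simp), List.map_cons, List.sum_cons, ih, pvRowA_neg r h]
      omega
    · rw [if_pos rfl, List.map_cons, List.map_cons, List.sum_cons, List.map_cons, List.sum_cons,
        ih, pvRowA_pos r h]

-- ===== VERDICT (by name: the statement is the Claim_ definition above) =====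
theorem find_illegal_characters_spec : Claim_equal_find_illegal_characters := by
  intro raw hdom
  unfold Spec_find_illegal_characters
  simp only [find_illegal_characters, find_illegal_characters_alt, clean_string]
  have hchars : ∀ c ∈ raw.toList, pvDomChar c = true := by
    unfold Dom_find_illegal_characters pvDomStr at hdom
    intro c hc
    exact List.all_eq_true.mp hdom c hc
  have htl : (String.ofList (pvCleanGo raw.toList)).toList = pvCleanGo raw.toList := by simp
  rw [htl, pvCleanGoRed]
  rw [PySem.List.foldl_append_if pvRowP pvRowC _ [], List.nil_append]
  rw [PySem.List.foldl_add, PySem.List.foldl_add, zero_add, zero_add]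
  rw [pvFilterMapSum (PySem.Chars.splitlines (pvRed raw.toList))]
  exact pvMain raw.toList.length raw.toList le_rfl hchars
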